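-- pv_equiv track=rewrite | github.com/TXyy2023/2026_mem_problemC | calculate_ranges.py | calculate_worst_rank_ranking_rule
-- ===== SOURCE A (Python) =====
-- def calculate_worst_rank_ranking_rule(my_judge_rank, other_judge_ranks, n_participants):
--     """
--     Calculate worst rank (max rank) for a candidate under Ranking Rule.
--     Strategy: Pair smallest available Other Judge Rank with largest usable Audience Rank < MyScore to Maximize Losses.
--     """
--     my_score = my_judge_rank + n_participants
--     others_j = sorted(other_judge_ranks) # Asc
--     available_audience = sorted(list(range(1, n_participants))) # 1 to N-1 (Asc)
--
--     matches = 0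
--     # Process J from smallest (strongest candidates)
--     # Try to pair with LARGEST feasible A
--
--     j_ptr = 0
--     a_ptr = len(available_audience) - 1
--
--     while j_ptr < len(others_j) and a_ptr >= 0:
--         if others_j[j_ptr] + available_audience[a_ptr] < my_score:
--             matches += 1
--             j_ptr += 1
--             a_ptr -= 1
--         else:
--             # A[a_ptr] is too big. No J can handle it.
--             a_ptr -= 1
--
--     return 1 + matches
-- ===== SOURCE B (Python) =====
-- def calculate_worst_rank_ranking_rule(my_judge_rank, other_judge_ranks, n_participants):
--     """Same result, but without materialising the audience list: walk the sorted
--     judge ranks once, tracking the current largest available audience value."""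
--     my_score = my_judge_rank + n_participants
--     matches = 0
--     a = n_participants - 1  # largest audience value still available
--     for j in sorted(other_judge_ranks):
--         a = min(a, my_score - j - 1)  # skip audience values too big for any later judge
--         if a < 1:
--             break
--         matches += 1
--         a -= 1
--     return 1 + matches
-- ===== Notes on version B (the rewrite author's own statement) =====
-- stated objective: alternative
-- what changed: B never builds the audience list range(1, n): it walks only the sorted judge ranks once, clamping a running 'largest available audience value' with min(), so the audience-side materialisation and second pointer disappear.
import Mathlib
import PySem

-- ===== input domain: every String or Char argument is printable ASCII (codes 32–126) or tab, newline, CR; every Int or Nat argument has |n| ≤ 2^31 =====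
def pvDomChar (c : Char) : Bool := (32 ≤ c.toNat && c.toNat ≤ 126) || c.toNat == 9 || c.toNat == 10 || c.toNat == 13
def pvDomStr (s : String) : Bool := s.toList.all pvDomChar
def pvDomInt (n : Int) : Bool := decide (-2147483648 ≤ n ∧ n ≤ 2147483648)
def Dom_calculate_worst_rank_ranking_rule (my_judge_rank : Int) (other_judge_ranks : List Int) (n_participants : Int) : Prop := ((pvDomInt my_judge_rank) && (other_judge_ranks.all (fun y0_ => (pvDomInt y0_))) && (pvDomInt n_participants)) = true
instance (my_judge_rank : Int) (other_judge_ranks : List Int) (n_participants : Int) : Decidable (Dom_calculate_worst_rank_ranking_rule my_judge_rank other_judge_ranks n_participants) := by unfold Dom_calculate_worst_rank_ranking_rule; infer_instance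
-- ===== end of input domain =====

-- B walks the sorted judge ranks once, tracking the current largest available
-- audience value with min(), instead of materialising, sorting and scanning the
-- audience list range(1, n) with a second pointer (objective: alternative).

-- ===== PORT A =====
-- while loop of A: fuel k = a_ptr + 1 (a_ptr decreases every iteration);
-- the two Python lists are held as arrays (Python lists ARE arrays: O(1) indexing)
def pvLoopA (oj av : Array Int) (ms : Int) : Nat → Nat → Int → Int
  | _, 0, acc => acc
  | jp, k + 1, acc =>
    if jp < oj.size then
      if oj.getD jp 0 + av.getD k 0 < ms then
        pvLoopA oj av ms (jp + 1) k (acc + 1)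
      else
        pvLoopA oj av ms jp k acc
    else acc

def calculate_worst_rank_ranking_rule (my_judge_rank : Int) (other_judge_ranks : List Int) (n_participants : Int) : Int :=
  let my_score := my_judge_rank + n_participants
  let others_j := (PySem.List.sorted other_judge_ranks (fun x => x) false).toArray
  -- sorted(list(range(1, n))): Python's sorted is a stable sort; ported as the
  -- stable library sort List.mergeSort (the identity on this already-sorted list: lemma pv_mergeSort_eq)
  let available_audience := ((PySem.List.pyRange 1 n_participants 1).mergeSort (fun a b => decide (a ≤ b))).toArray
  1 + pvLoopA others_j available_audience my_score 0 available_audience.size 0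

-- ===== PORT B =====
def pvLoopB (ms : Int) : List Int → Int → Int → Int
  | [], _, acc => acc
  | j :: rest, a, acc =>
    let a' := min a (ms - j - 1)
    if a' < 1 then acc
    else pvLoopB ms rest (a' - 1) (acc + 1)

def calculate_worst_rank_ranking_rule_alt (my_judge_rank : Int) (other_judge_ranks : List Int) (n_participants : Int) : Int :=
  let my_score := my_judge_rank + n_participants
  1 + pvLoopB my_score (PySem.List.sorted other_judge_ranks (fun x => x) false) (n_participants - 1) 0

-- ===== PRECONDITION & SPEC =====
def Spec_calculate_worst_rank_ranking_rule (my_judge_rank : Int) (other_judge_ranks : List Int) (n_participants : Int) (out : Int) : Prop := out = calculate_worst_rank_ranking_rule_alt my_judge_rank other_judge_ranks n_participants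
instance (my_judge_rank : Int) (other_judge_ranks : List Int) (n_participants : Int) (out : Int) : Decidable (Spec_calculate_worst_rank_ranking_rule my_judge_rank other_judge_ranks n_participants out) := by unfold Spec_calculate_worst_rank_ranking_rule; infer_instance

-- ===== CLAIM (what is proved, stated in full; the proofs are below) =====
def Claim_equal_calculate_worst_rank_ranking_rule : Prop := ∀ (my_judge_rank : Int) (other_judge_ranks : List Int) (n_participants : Int), Dom_calculate_worst_rank_ranking_rule my_judge_rank other_judge_ranks n_participants → Spec_calculate_worst_rank_ranking_rule my_judge_rank other_judge_ranks n_participants (calculate_worst_rank_ranking_rule my_judge_rank other_judge_ranks n_participants)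

-- ===== LEMMAS AND PROOFS =====

-- the audience list is already sorted, so sorting it is the identity
theorem pv_mergeSort_eq (n : Int) :
    (PySem.List.pyRange 1 n 1).mergeSort (fun a b => decide (a ≤ b)) = PySem.List.pyRange 1 n 1 := by
  apply List.mergeSort_eq_self
  exact ((PySem.List.pairwise_lt_pyRange_one 1 n).imp (fun h => le_of_lt h)).imp (fun h => by simpa using h)

theorem pv_getD_toArray (xs : List Int) (k : Nat) (d : Int) :
    xs.toArray.getD k d = xs.getD k d := by
  simp only [Array.getD, List.size_toArray, List.getD]
  by_cases h : k < xs.length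
  · simp [h]
  · simp [h]

theorem pv_range_getD (n : Int) (k : Nat) (hk : k < (PySem.List.pyRange 1 n 1).length) :
    (PySem.List.pyRange 1 n 1).getD k 0 = (k : Int) + 1 := by
  rw [List.getD_eq_getElem _ _ hk, PySem.List.getElem_pyRange_one]
  omega

-- B's loop is constant once the available value is below 1
theorem pvLoopB_nonpos (ms : Int) (l : List Int) (a m : Int) (ha : a ≤ 0) :
    pvLoopB ms l a m = m := by
  cases l with
  | nil => rfl
  | cons j rest =>
    simp only [pvLoopB]
    have : min a (ms - j - 1) < 1 := by omega
    simp [this]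

-- main correspondence: A's two-pointer loop with audience fuel k equals B's loop
-- on the remaining judges with current largest audience value k
theorem pv_loop_eq (n ms : Int) (oj : List Int) :
    ∀ (k jp : Nat) (m : Int), k ≤ (PySem.List.pyRange 1 n 1).length → jp ≤ oj.length →
      pvLoopA oj.toArray (PySem.List.pyRange 1 n 1).toArray ms jp k m = pvLoopB ms (oj.drop jp) (k : Int) m := by
  intro k
  induction k with
  | zero =>
    intro jp m _ _
    simp only [pvLoopA, Nat.cast_zero]
    rw [pvLoopB_nonpos _ _ _ _ (le_refl 0)]
  | succ k ih =>
    intro jp m hk hjp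
    simp only [pvLoopA, List.size_toArray, pv_getD_toArray]
    by_cases hlt : jp < oj.length
    · have hdrop : oj.drop jp = oj.getD jp 0 :: oj.drop (jp + 1) := by
        rw [List.getD_eq_getElem _ _ hlt]
        exact (List.drop_eq_getElem_cons hlt)
      have hav : (PySem.List.pyRange 1 n 1).getD k 0 = (k : Int) + 1 :=
        pv_range_getD n k (by omega)
      rw [hdrop]
      set j := oj.getD jp 0 with hj
      by_cases hcond : j + (PySem.List.pyRange 1 n 1).getD k 0 < ms
      · -- match: B keeps a' = k+1
        simp only [hlt, if_true, hcond, if_true]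
        rw [ih (jp + 1) (m + 1) (by omega) (by omega)]
        have ha' : min ((k : Int) + 1) (ms - j - 1) = (k : Int) + 1 := by
          rw [hav] at hcond; omega
        simp only [pvLoopB]
        push_cast
        rw [ha']
        have : ¬ ((k : Int) + 1 < 1) := by omega
        simp only [this, if_false]
        norm_num
      · -- skip: B clamps a' to ms - j - 1 ≤ k
        simp only [hlt, if_true, hcond, if_false]
        rw [ih jp m (by omega) (by omega), hdrop]
        rw [hav] at hcond
        have hle : ms - j - 1 ≤ (k : Int) := by omega
        have h1 : min ((k : Int) + 1) (ms - j - 1) = ms - j - 1 := by omega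
        have h2 : min ((k : Int)) (ms - j - 1) = ms - j - 1 := by omega
        simp only [pvLoopB]
        push_cast
        rw [h1, h2]
    · have hjpe : jp = oj.length := by omega
      simp only [hlt, if_false]
      rw [hjpe, List.drop_length]
      simp [pvLoopB]

theorem pv_len_range (n : Int) :
    ((PySem.List.pyRange 1 n 1).length : Int) = max (n - 1) 0 := by
  rw [PySem.List.length_pyRange_one]
  omega

-- ===== VERDICT (by name: the statement is the Claim_ definition above) =====
theorem calculate_worst_rank_ranking_rule_spec : Claim_equal_calculate_worst_rank_ranking_rule := by
  intro mj oj n _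
  unfold Spec_calculate_worst_rank_ranking_rule
  unfold calculate_worst_rank_ranking_rule calculate_worst_rank_ranking_rule_alt
  simp only [pv_mergeSort_eq]
  set s := PySem.List.sorted oj (fun x => x) false
  rw [List.size_toArray]
  rw [pv_loop_eq n (mj + n) s _ 0 0 (le_refl _) (Nat.zero_le _), List.drop_zero]
  have hlen := pv_len_range n
  by_cases hn : 1 ≤ n
  · have : ((PySem.List.pyRange 1 n 1).length : Int) = n - 1 := by omega
    rw [this]
  · have : ((PySem.List.pyRange 1 n 1).length : Int) = 0 := by omega
    rw [this, pvLoopB_nonpos _ _ _ _ (le_refl 0), pvLoopB_nonpos _ _ _ _ (by omega : n - 1 ≤ 0)]
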